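-- pv_equiv track=rewrite | github.com/averkhaturau/InEfAn | src/analysis/utils.py | app_intervals
-- ===== SOURCE A (Python) =====
-- def app_intervals(fw):
--     intervals_with_app = []
--     for app in fw:
--         if intervals_with_app and intervals_with_app[-1][0] != app[1]["procname"]:
--             intervals_with_app[-1][1].append(app[0])
--             intervals_with_app.append([app[1]["procname"], [app[0]]])
--         elif not intervals_with_app:
--             intervals_with_app.append([app[1]["procname"], [app[0]]])
--     by_app = {}
--     for a in intervals_with_app:
--         if not a[0] in by_app:
--             by_app.update({a[0]:[]})
--         by_app[a[0]].append(a[1])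
--     return by_app
-- ===== SOURCE B (Python) =====
-- def app_intervals(fw):
--     # staged index-based computation: names/timestamps extracted, run-boundary
--     # indices computed over the index range, intervals built by index lookahead.
--     names = [rec[1]["procname"] for rec in fw]
--     ts = [rec[0] for rec in fw]
--     starts = [i for i in range(len(ts)) if i == 0 or names[i] != names[i - 1]]
--     result = {}
--     for j, b in enumerate(starts):
--         interval = [ts[b], ts[starts[j + 1]]] if j + 1 < len(starts) else [ts[b]]
--         result.setdefault(names[b], []).append(interval)
--     return result
-- ===== Notes on version B (the rewrite author's own statement) =====
-- stated objective: alternative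
-- what changed: B works over indices in staged passes: it extracts the name and timestamp columns, computes the list of run-boundary indices by filtering the index range on names[i] != names[i-1], and then builds each interval by pure index lookahead into that boundary list (starts[j+1] gives the closing timestamp), grouping via setdefault; A instead makes one mutating pass that closes and opens intervals inside a growing list-of-lists and then regroups it with a second loop; Pre_ only excludes inputs where some record lacks the 'procname' key, on which both A and B raise KeyError.
import Mathlib
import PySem

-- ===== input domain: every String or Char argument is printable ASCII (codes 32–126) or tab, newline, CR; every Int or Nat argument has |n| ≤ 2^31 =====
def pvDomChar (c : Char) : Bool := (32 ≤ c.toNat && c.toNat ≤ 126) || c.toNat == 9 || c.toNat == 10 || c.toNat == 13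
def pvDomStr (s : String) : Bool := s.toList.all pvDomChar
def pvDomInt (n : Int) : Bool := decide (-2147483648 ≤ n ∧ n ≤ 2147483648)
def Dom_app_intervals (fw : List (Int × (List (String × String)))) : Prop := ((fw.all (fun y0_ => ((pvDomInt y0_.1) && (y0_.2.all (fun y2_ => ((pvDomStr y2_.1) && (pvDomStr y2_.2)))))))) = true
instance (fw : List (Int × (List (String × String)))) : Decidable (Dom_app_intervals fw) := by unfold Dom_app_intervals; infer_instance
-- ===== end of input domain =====

-- B replaces A's mutating append-to-last interval pass + regrouping loop by staged index-based
-- passes (name/timestamp columns, boundary-index filter, interval by index lookahead);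
-- same O(n) cost, different structure (objective: alternative).


-- ===== PORT A =====
-- app[1]["procname"]: first-match lookup in the association list; Pre_ guarantees the key is
-- present (Python raises KeyError otherwise), so the "" default is never reached inside Pre_.
def pnOf (d : List (String × String)) : String :=
  ((d.find? (fun p => p.1 == "procname")).map (·.2)).getD ""

-- one iteration of A's first loop; the state is intervals_with_app REVERSED
-- (head = Python's intervals_with_app[-1]); it is reversed back in app_intervals.
def stepA (acc : List (String × List Int)) (a : Int × List (String × String)) :
    List (String × List Int) :=
  match acc with
  | [] => [(pnOf a.2, [a.1])]
  | (name, ts) :: rest =>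
      if name ≠ pnOf a.2 then
        (pnOf a.2, [a.1]) :: (name, ts ++ [a.1]) :: rest
      else
        (name, ts) :: rest

-- one iteration of A's second loop: 'if not a[0] in by_app: by_app.update({a[0]:[]})' then append
def updA (d : PySem.Dict String (List (List Int))) (a : String × List Int) :
    PySem.Dict String (List (List Int)) :=
  let d1 := if !(d.contains a.1) then d.insert a.1 [] else d
  d1.modify a.1 [] (fun v => v ++ [a.2])

def app_intervals (fw : List (Int × (List (String × String)))) : List (String × List (List Int)) :=
  let intervals_with_app := (fw.foldl stepA []).reverse
  (intervals_with_app.foldl updA PySem.Dict.empty).items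

-- ===== PORT B =====
-- 'starts = [i for i in range(len(ts)) if i == 0 or names[i] != names[i-1]]':
-- all indices here lie in [0, len names), and names[i-1] is only reached when i ≥ 1,
-- so Nat List.range + getD is exact for Python's range + in-range indexing.
def startsB (names : List String) (ts : List Int) : List Nat :=
  (List.range ts.length).filter (fun i => i == 0 || !(names.getD i "" == names.getD (i - 1) ""))

-- loop body: interval by lookahead into starts (starts[j+1] exists iff j+1 < len(starts),
-- and j ≥ 0 always, so (j+1).toNat-based getD is exact); then setdefault + append.
def bodyB (names : List String) (ts : List Int) (starts : List Nat)
    (d : PySem.Dict String (List (List Int))) (jb : Int × Nat) :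
    PySem.Dict String (List (List Int)) :=
  let interval : List Int :=
    if jb.1 + 1 < (starts.length : Int) then
      [ts.getD jb.2 0, ts.getD (starts.getD (jb.1 + 1).toNat 0) 0]
    else
      [ts.getD jb.2 0]
  (d.setdefault (names.getD jb.2 "") []).modify (names.getD jb.2 "") [] (fun v => v ++ [interval])

def app_intervals_alt (fw : List (Int × (List (String × String)))) :
    List (String × List (List Int)) :=
  let names := fw.map (fun r => pnOf r.2)
  let ts := fw.map (·.1)
  let starts := startsB names ts
  ((PySem.List.enumerate starts 0).foldl (bodyB names ts starts) PySem.Dict.empty).items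

-- ===== PRECONDITION & SPEC =====
-- Pre_ excludes exactly the inputs on which Python A raises KeyError: a record whose dict has no
-- "procname" key (B raises there too).
def Pre_app_intervals (fw : List (Int × (List (String × String)))) : Prop :=
  ∀ x ∈ fw, (x.2.find? (fun p => p.1 == "procname")).isSome = true
instance (fw : List (Int × (List (String × String)))) : Decidable (Pre_app_intervals fw) := by
  unfold Pre_app_intervals; infer_instance

def pvWitness_app_intervals : (List (Int × (List (String × String)))) :=
  [(1, [("procname", "x")]), (2, [("procname", "y")])]

def Spec_app_intervals (fw : List (Int × (List (String × String)))) (out : List (String × List (List Int))) : Prop := out = app_intervals_alt fw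
instance (fw : List (Int × (List (String × String)))) (out : List (String × List (List Int))) : Decidable (Spec_app_intervals fw out) := by unfold Spec_app_intervals; infer_instance

-- ===== CLAIM (what is proved, stated in full; the proofs are below) =====
def Claim_equal_app_intervals : Prop := ∀ (fw : List (Int × (List (String × String)))), Dom_app_intervals fw → Pre_app_intervals fw → Spec_app_intervals fw (app_intervals fw)

-- ===== LEMMAS AND PROOFS =====

-- the (procname, first timestamp) of each maximal run of consecutive equal-procname records
def runsB : List (Int × (List (String × String))) → List (String × Int)
  | [] => []
  | (t, d) :: rest =>
      let k := pnOf d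
      (k, t) :: runsB (rest.dropWhile (fun x => pnOf x.2 == k))
termination_by l => l.length
decreasing_by
  simp only [List.length_cons]
  have := List.length_dropWhile_le (fun x => pnOf x.2 == pnOf d) rest
  omega

-- each element paired with its successor, the last with none
def adj {α : Type} : List α → List (α × Option α)
  | [] => []
  | a :: r => (a, r.head?) :: adj r

-- fold body over (run, next run): interval = [start] / [start, next start]
def updB (d : PySem.Dict String (List (List Int))) (p : (String × Int) × Option (String × Int)) :
    PySem.Dict String (List (List Int)) :=
  let interval : List Int :=
    match p.2 with
    | none => [p.1.2]
    | some nxt => [p.1.2, nxt.2]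
  (d.setdefault p.1.1 []).modify p.1.1 [] (fun v => v ++ [interval])

-- common canonical form both ports are reduced to
def specF (fw : List (Int × (List (String × String)))) : List (String × List (List Int)) :=
  ((adj (runsB fw)).foldl updB PySem.Dict.empty).items

-- ---------- A-side ----------

-- the interval list A builds, expressed over the runs list
def attachRuns : List (String × Int) → List (String × List Int)
  | [] => []
  | [(n, t)] => [(n, [t])]
  | (n, t) :: (m, s) :: r => (n, [t, s]) :: attachRuns ((m, s) :: r)

-- A's reversed accumulator after consuming the rest of fw, starting from open interval (k, ts)
def revAttach : String → List Int → List (String × Int) → List (String × List Int)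
  | k, ts, [] => [(k, ts)]
  | k, ts, (m, s) :: r => revAttach m [s] r ++ [(k, ts ++ [s])]

lemma foldl_stepA_same (l : List (Int × (List (String × String)))) (k : String) (ts : List Int)
    (rest : List (String × List Int)) (h : ∀ x ∈ l, pnOf x.2 = k) :
    l.foldl stepA ((k, ts) :: rest) = (k, ts) :: rest := by
  induction l with
  | nil => rfl
  | cons y l ih =>
      have hy : pnOf y.2 = k := h y (List.mem_cons_self ..)
      have : stepA ((k, ts) :: rest) y = (k, ts) :: rest := by
        simp [stepA, hy]
      rw [List.foldl_cons, this]
      exact ih (fun x hx => h x (List.mem_cons_of_mem _ hx))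

lemma foldl_stepA_eq_revAttach (fw : List (Int × (List (String × String)))) :
    ∀ (k : String) (ts : List Int) (rest : List (String × List Int)),
    fw.foldl stepA ((k, ts) :: rest) =
      revAttach k ts (runsB (fw.dropWhile (fun x => pnOf x.2 == k))) ++ rest := by
  induction hn : fw.length using Nat.strong_induction_on generalizing fw with
  | _ n IH => ?_
  subst hn
  intro k ts rest
  have hsplit : fw = fw.takeWhile (fun x => pnOf x.2 == k) ++ fw.dropWhile (fun x => pnOf x.2 == k) :=
    (List.takeWhile_append_dropWhile).symm
  conv_lhs => rw [hsplit]
  rw [List.foldl_append]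
  rw [foldl_stepA_same _ k ts rest
    (fun x hx => by simpa using (List.mem_takeWhile_imp hx))]
  cases hdw : fw.dropWhile (fun x => pnOf x.2 == k) with
  | nil => simp [runsB, revAttach]
  | cons y tl =>
      have hy : pnOf y.2 ≠ k := by
        have := List.head?_dropWhile_not (fun x => pnOf x.2 == k) fw
        rw [hdw] at this
        simpa using this
      have hstep : stepA ((k, ts) :: rest) y =
          (pnOf y.2, [y.1]) :: (k, ts ++ [y.1]) :: rest := by
        simp [stepA, Ne.symm hy]
      have hlen : tl.length < fw.length := by
        have h1 := List.length_dropWhile_le (fun x => pnOf x.2 == k) fw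
        rw [hdw] at h1
        simp at h1
        omega
      rw [List.foldl_cons, hstep, IH tl.length hlen tl rfl (pnOf y.2) [y.1] ((k, ts ++ [y.1]) :: rest)]
      rw [runsB]
      simp [revAttach]

lemma reverse_revAttach (rs : List (String × Int)) :
    ∀ (k : String) (t : Int), (revAttach k [t] rs).reverse = attachRuns ((k, t) :: rs) := by
  induction rs with
  | nil => intro k t; rfl
  | cons p r ih =>
      intro k t
      obtain ⟨m, s⟩ := p
      rw [revAttach, List.reverse_append, ih m s]
      rfl

lemma map_adj_runs (rs : List (String × Int)) :
    (adj rs).map (fun p => ((p.1.1 : String),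
        (match p.2 with
         | none => [p.1.2]
         | some nxt => [p.1.2, nxt.2] : List Int))) = attachRuns rs := by
  induction rs with
  | nil => rfl
  | cons a r ih =>
      obtain ⟨n, t⟩ := a
      cases r with
      | nil => rfl
      | cons b r' =>
          obtain ⟨m, s⟩ := b
          show ((n, [t, s]) : String × List Int) ::
              (adj ((m, s) :: r')).map (fun p => ((p.1.1 : String),
                (match p.2 with
                 | none => [p.1.2]
                 | some nxt => [p.1.2, nxt.2] : List Int))) =
            (n, [t, s]) :: attachRuns ((m, s) :: r')
          rw [ih]

lemma updB_eq_updA (d : PySem.Dict String (List (List Int)))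
    (p : (String × Int) × Option (String × Int)) :
    updB d p = updA d ((p.1.1 : String),
        (match p.2 with
         | none => [p.1.2]
         | some nxt => [p.1.2, nxt.2] : List Int)) := by
  cases hc : d.contains p.1.1 with
  | true => simp [updB, updA, hc, PySem.Dict.setdefault_of_contains _ _ hc]
  | false => simp [updB, updA, hc, PySem.Dict.setdefault_of_not_contains _ _ hc]

lemma intervals_eq_attachRuns (fw : List (Int × (List (String × String)))) :
    (fw.foldl stepA []).reverse = attachRuns (runsB fw) := by
  cases fw with
  | nil => simp [runsB, attachRuns]
  | cons y tl =>
      have h0 : stepA [] y = [(pnOf y.2, [y.1])] := rfl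
      rw [List.foldl_cons, h0,
        foldl_stepA_eq_revAttach tl (pnOf y.2) [y.1] [],
        List.append_nil, reverse_revAttach, runsB]

lemma app_intervals_eq_specF (fw : List (Int × (List (String × String)))) :
    app_intervals fw = specF fw := by
  show (((fw.foldl stepA []).reverse).foldl updA PySem.Dict.empty).items = specF fw
  unfold specF
  rw [intervals_eq_attachRuns, ← map_adj_runs, List.foldl_map]
  congr 1
  apply PySem.List.foldl_congr_mem
  intro d p _
  exact (updB_eq_updA d p).symm

-- ---------- B-side ----------

def nmG (fw : List (Int × (List (String × String)))) (i : Nat) : String :=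
  (fw.map (fun r => pnOf r.2)).getD i ""

def tsG (fw : List (Int × (List (String × String)))) (i : Nat) : Int :=
  (fw.map (·.1)).getD i 0

def gIdx (fw : List (Int × (List (String × String)))) (i : Nat) : String × Int :=
  (nmG fw i, tsG fw i)

lemma getD_append_shift {α : Type} (A B : List α) (j : Nat) (d : α) :
    (A ++ B).getD (A.length + j) d = B.getD j d := by
  simp [List.getD, List.getElem?_append_right (Nat.le_add_right A.length j)]

lemma getD_cons_append_shift {α : Type} (x : α) (A B : List α) (j : Nat) (d : α) :
    (x :: (A ++ B)).getD (1 + A.length + j) d = B.getD j d := by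
  have h1 : x :: (A ++ B) = (x :: A) ++ B := rfl
  have h2 : 1 + A.length + j = (x :: A).length + j := by simp; omega
  rw [h1, h2, getD_append_shift]

lemma nmG_shift (y : Int × (List (String × String))) (run rest : List (Int × (List (String × String))))
    (j : Nat) : nmG (y :: (run ++ rest)) (1 + run.length + j) = nmG rest j := by
  unfold nmG
  simp only [List.map_cons, List.map_append]
  rw [show run.length = (run.map (fun r => pnOf r.2)).length by simp]
  exact getD_cons_append_shift _ _ _ _ _

lemma tsG_shift (y : Int × (List (String × String))) (run rest : List (Int × (List (String × String))))
    (j : Nat) : tsG (y :: (run ++ rest)) (1 + run.length + j) = tsG rest j := by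
  unfold tsG
  simp only [List.map_cons, List.map_append]
  rw [show run.length = (run.map (·.1)).length by simp]
  exact getD_cons_append_shift _ _ _ _ _

lemma gIdx_shift (y : Int × (List (String × String))) (run rest : List (Int × (List (String × String))))
    (j : Nat) : gIdx (y :: (run ++ rest)) (1 + run.length + j) = gIdx rest j := by
  unfold gIdx
  rw [nmG_shift, tsG_shift]

lemma nmG_run_k (y : Int × (List (String × String))) (run rest : List (Int × (List (String × String)))) (k : String)
    (hy : pnOf y.2 = k) (hrun : ∀ x ∈ run, pnOf x.2 = k) :
    ∀ i ≤ run.length, nmG (y :: (run ++ rest)) i = k := by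
  intro i hi
  unfold nmG
  cases i with
  | zero => simpa using hy
  | succ j =>
      simp only [List.map_cons, List.map_append, List.getD_cons_succ]
      have hj : j < (run.map (fun r => pnOf r.2)).length := by simp; omega
      rw [List.getD, List.getElem?_append_left hj]
      simp only [List.getElem?_eq_getElem hj, Option.getD_some]
      rw [List.getElem_map]
      exact hrun _ (List.getElem_mem _)

-- the boundary-index filter, written over nmG
lemma startsB_eq (fw : List (Int × (List (String × String)))) :
    startsB (fw.map (fun r => pnOf r.2)) (fw.map (·.1)) =
      (List.range fw.length).filter (fun i => i == 0 || !(nmG fw i == nmG fw (i - 1))) := by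
  simp [startsB, nmG]

lemma starts_map_gIdx (fw : List (Int × (List (String × String)))) :
    ((List.range fw.length).filter
        (fun i => i == 0 || !(nmG fw i == nmG fw (i - 1)))).map (gIdx fw) = runsB fw := by
  induction hn : fw.length using Nat.strong_induction_on generalizing fw with
  | _ n IH => ?_
  subst hn
  cases hfw : fw with
  | nil => simp [runsB]
  | cons y tl =>
      subst hfw
      obtain ⟨t, d⟩ := y
      obtain ⟨run, rest, htl, hrunk, hrestk, hrest⟩ :
          ∃ run rest, tl = run ++ rest ∧ (∀ x ∈ run, pnOf x.2 = pnOf d) ∧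
            (∀ z rs, rest = z :: rs → pnOf z.2 ≠ pnOf d) ∧
            rest = tl.dropWhile (fun x => pnOf x.2 == pnOf d) := by
        refine ⟨tl.takeWhile (fun x => pnOf x.2 == pnOf d),
          tl.dropWhile (fun x => pnOf x.2 == pnOf d),
          (List.takeWhile_append_dropWhile).symm, ?_, ?_, rfl⟩
        · intro x hx
          have := List.mem_takeWhile_imp hx
          simpa using this
        · intro z rs hzr
          have h := List.head?_dropWhile_not (fun x => pnOf x.2 == pnOf d) tl
          rw [hzr] at h
          simpa using h
      subst htl
      have hlen : ((t, d) :: (run ++ rest)).length = (1 + run.length) + rest.length := by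
        simp; omega
      have hnmk : ∀ i ≤ run.length, nmG ((t, d) :: (run ++ rest)) i = pnOf d :=
        nmG_run_k (t, d) run rest (pnOf d) rfl hrunk
      have hgs : ∀ j, gIdx ((t, d) :: (run ++ rest)) (1 + run.length + j) = gIdx rest j :=
        fun j => gIdx_shift _ _ _ _
      have hnms : ∀ j, nmG ((t, d) :: (run ++ rest)) (1 + run.length + j) = nmG rest j :=
        fun j => nmG_shift _ _ _ _
      rw [hlen, List.range_add, List.filter_append]
      -- first chunk [0, 1+run.length): only index 0 survives (names constant on the first run)
      have h1 : (List.range (1 + run.length)).filter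
          (fun i => i == 0 || !(nmG ((t, d) :: (run ++ rest)) i == nmG ((t, d) :: (run ++ rest)) (i - 1))) = [0] := by
        rw [List.range_add, List.filter_append]
        have ha : (List.range 1).filter
            (fun i => i == 0 || !(nmG ((t, d) :: (run ++ rest)) i == nmG ((t, d) :: (run ++ rest)) (i - 1))) = [0] := by
          simp [List.range_succ]
        have hb : ((List.range run.length).map (1 + ·)).filter
            (fun i => i == 0 || !(nmG ((t, d) :: (run ++ rest)) i == nmG ((t, d) :: (run ++ rest)) (i - 1))) = [] := by
          rw [List.filter_eq_nil_iff]
          intro a ha'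
          obtain ⟨j, hj, rfl⟩ := by simpa using ha'
          have e1 : nmG ((t, d) :: (run ++ rest)) (j + 1) = pnOf d := hnmk (j + 1) (by omega)
          have e2 : nmG ((t, d) :: (run ++ rest)) j = pnOf d := hnmk j (by omega)
          simp [Nat.add_comm 1 j, e1, e2]
        rw [ha, hb]
        rfl
      rw [h1]
      -- second chunk: the boundary filter of rest, shifted by 1 + run.length
      have h2 : ((List.range rest.length).map (fun j => 1 + run.length + j)).filter
          (fun i => i == 0 || !(nmG ((t, d) :: (run ++ rest)) i == nmG ((t, d) :: (run ++ rest)) (i - 1))) =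
          ((List.range rest.length).filter
            (fun j => j == 0 || !(nmG rest j == nmG rest (j - 1)))).map (fun j => 1 + run.length + j) := by
        rw [List.filter_map]
        congr 1
        apply List.filter_congr
        intro j hj
        have hjlen : j < rest.length := by simpa using hj
        simp only [Function.comp_apply]
        cases j with
        | zero =>
            obtain ⟨z, rs, hzr⟩ : ∃ z rs, rest = z :: rs := by
              cases rest with
              | nil => simp at hjlen
              | cons z rs => exact ⟨z, rs, rfl⟩
            have e0 : nmG rest 0 = pnOf z.2 := by rw [hzr]; simp [nmG]
            have e1 : nmG ((t, d) :: (run ++ rest)) (1 + run.length) = pnOf z.2 := by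
              have h0 := (hnms 0).trans e0
              simpa using h0
            have e2 : nmG ((t, d) :: (run ++ rest)) run.length = pnOf d :=
              hnmk run.length (le_refl _)
            have hzk : pnOf z.2 ≠ pnOf d := hrestk z rs hzr
            simp [e1, e2, hzk]
        | succ j' =>
            have e1 : nmG ((t, d) :: (run ++ rest)) (1 + run.length + (j' + 1)) = nmG rest (j' + 1) :=
              hnms (j' + 1)
            have e2 : nmG ((t, d) :: (run ++ rest)) (1 + run.length + j') = nmG rest j' := hnms j'
            simp [e1, e2]
      rw [h2]
      -- map gIdx and close with the IH on rest
      have hrl : rest.length < ((t, d) :: (run ++ rest)).length := by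
        simp
      rw [List.map_append, List.map_map]
      have hcomp : (gIdx ((t, d) :: (run ++ rest))) ∘ (fun j => 1 + run.length + j) = gIdx rest := by
        funext j
        exact hgs j
      rw [hcomp, IH rest.length hrl rest rfl]
      have hg0 : [(0 : Nat)].map (gIdx ((t, d) :: (run ++ rest))) = [(pnOf d, t)] := by
        simp [gIdx, nmG, tsG]
      rw [hg0, runsB]
      rw [← hrest]
      rfl

lemma enumerate_map_lookahead {α : Type} (dflt : α) (L : List α) :
    ∀ (l pre : List α), L = pre ++ l →
    (PySem.List.enumerate l (pre.length : Int)).map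
        (fun jb => (jb.2, if jb.1 + 1 < (L.length : Int) then some (L.getD (jb.1 + 1).toNat dflt) else none))
      = adj l := by
  intro l
  induction l with
  | nil => intro pre hL; simp [PySem.List.enumerate_nil, adj]
  | cons a rest ih =>
      intro pre hL
      rw [PySem.List.enumerate_cons, List.map_cons]
      have hLlen : L.length = pre.length + 1 + rest.length := by
        rw [hL]; simp; omega
      have htail : (PySem.List.enumerate rest ((pre.length : Int) + 1)).map
          (fun jb => (jb.2, if jb.1 + 1 < (L.length : Int) then some (L.getD (jb.1 + 1).toNat dflt) else none))
          = adj rest := by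
        have hpre' : L = (pre ++ [a]) ++ rest := by rw [hL]; simp
        have hlen' : ((pre ++ [a]).length : Int) = (pre.length : Int) + 1 := by simp
        rw [← hlen']
        exact ih (pre ++ [a]) hpre'
      cases rest with
      | nil =>
          have hcond : ¬ ((pre.length : Int) + 1 < (L.length : Int)) := by
            rw [hLlen]; simp only [List.length_nil, Nat.add_zero]; push_cast; omega
          simp [PySem.List.enumerate_nil, adj, hcond]
      | cons b r =>
          have hcond : (pre.length : Int) + 1 < (L.length : Int) := by
            rw [hLlen]; simp only [List.length_cons]; push_cast; omega
          have hget : L.getD ((pre.length : Int) + 1).toNat dflt = b := by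
            have ht : ((pre.length : Int) + 1).toNat = (pre ++ [a]).length + 0 := by simp
            have hL' : L = (pre ++ [a]) ++ (b :: r) := by rw [hL]; simp
            rw [ht, hL', getD_append_shift]
            rfl
          rw [htail]
          simp only [hcond, if_pos, hget]
          rfl

lemma adj_map {α β : Type} (f : α → β) (l : List α) :
    (adj l).map (fun p => (f p.1, p.2.map f)) = adj (l.map f) := by
  induction l with
  | nil => rfl
  | cons a r ih =>
      simp [adj, List.head?_map, ih]

lemma bodyB_eq (fw : List (Int × (List (String × String)))) (starts : List Nat)
    (d : PySem.Dict String (List (List Int))) (jb : Int × Nat) :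
    bodyB (fw.map (fun r => pnOf r.2)) (fw.map (·.1)) starts d jb =
      updB d ((fun p : Nat × Option Nat => (gIdx fw p.1, p.2.map (gIdx fw)))
        ((fun jb : Int × Nat => (jb.2,
            if jb.1 + 1 < (starts.length : Int) then some (starts.getD (jb.1 + 1).toNat 0) else none)) jb)) := by
  unfold bodyB updB gIdx nmG tsG
  by_cases hc : jb.1 + 1 < (starts.length : Int)
  · simp [hc]
  · simp [hc]

lemma app_intervals_alt_eq_specF (fw : List (Int × (List (String × String)))) :
    app_intervals_alt fw = specF fw := by
  show ((PySem.List.enumerate (startsB (fw.map (fun r => pnOf r.2)) (fw.map (·.1))) 0).foldl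
      (bodyB (fw.map (fun r => pnOf r.2)) (fw.map (·.1))
        (startsB (fw.map (fun r => pnOf r.2)) (fw.map (·.1)))) PySem.Dict.empty).items = specF fw
  unfold specF
  congr 1
  have hstarts : (startsB (fw.map (fun r => pnOf r.2)) (fw.map (·.1))).map (gIdx fw) = runsB fw := by
    rw [startsB_eq]
    exact starts_map_gIdx fw
  have hF : (PySem.List.enumerate (startsB (fw.map (fun r => pnOf r.2)) (fw.map (·.1))) 0).map
      (fun jb : Int × Nat => (jb.2,
        if jb.1 + 1 < ((startsB (fw.map (fun r => pnOf r.2)) (fw.map (·.1))).length : Int)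
        then some ((startsB (fw.map (fun r => pnOf r.2)) (fw.map (·.1))).getD (jb.1 + 1).toNat 0)
        else none))
      = adj (startsB (fw.map (fun r => pnOf r.2)) (fw.map (·.1))) := by
    have h := enumerate_map_lookahead (0 : Nat)
      (startsB (fw.map (fun r => pnOf r.2)) (fw.map (·.1)))
      (startsB (fw.map (fun r => pnOf r.2)) (fw.map (·.1))) [] (by simp)
    simpa using h
  calc (PySem.List.enumerate (startsB (fw.map (fun r => pnOf r.2)) (fw.map (·.1))) 0).foldl
        (bodyB (fw.map (fun r => pnOf r.2)) (fw.map (·.1))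
          (startsB (fw.map (fun r => pnOf r.2)) (fw.map (·.1)))) PySem.Dict.empty
      = (PySem.List.enumerate (startsB (fw.map (fun r => pnOf r.2)) (fw.map (·.1))) 0).foldl
        (fun d jb => updB d ((fun p : Nat × Option Nat => (gIdx fw p.1, p.2.map (gIdx fw)))
          ((fun jb : Int × Nat => (jb.2,
            if jb.1 + 1 < ((startsB (fw.map (fun r => pnOf r.2)) (fw.map (·.1))).length : Int)
            then some ((startsB (fw.map (fun r => pnOf r.2)) (fw.map (·.1))).getD (jb.1 + 1).toNat 0)
            else none)) jb))) PySem.Dict.empty := by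
        apply PySem.List.foldl_congr_mem
        intro d jb _
        exact bodyB_eq fw _ d jb
    _ = ((PySem.List.enumerate (startsB (fw.map (fun r => pnOf r.2)) (fw.map (·.1))) 0).map
          (fun jb : Int × Nat => (fun p : Nat × Option Nat => (gIdx fw p.1, p.2.map (gIdx fw)))
            ((fun jb : Int × Nat => (jb.2,
              if jb.1 + 1 < ((startsB (fw.map (fun r => pnOf r.2)) (fw.map (·.1))).length : Int)
              then some ((startsB (fw.map (fun r => pnOf r.2)) (fw.map (·.1))).getD (jb.1 + 1).toNat 0)
              else none)) jb))).foldl updB PySem.Dict.empty := by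
        rw [List.foldl_map]
    _ = (((PySem.List.enumerate (startsB (fw.map (fun r => pnOf r.2)) (fw.map (·.1))) 0).map
          (fun jb : Int × Nat => (jb.2,
            if jb.1 + 1 < ((startsB (fw.map (fun r => pnOf r.2)) (fw.map (·.1))).length : Int)
            then some ((startsB (fw.map (fun r => pnOf r.2)) (fw.map (·.1))).getD (jb.1 + 1).toNat 0)
            else none))).map
          (fun p : Nat × Option Nat => (gIdx fw p.1, p.2.map (gIdx fw)))).foldl updB PySem.Dict.empty := by
        rw [List.map_map]
        rfl
    _ = ((adj (startsB (fw.map (fun r => pnOf r.2)) (fw.map (·.1)))).map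
          (fun p : Nat × Option Nat => (gIdx fw p.1, p.2.map (gIdx fw)))).foldl updB PySem.Dict.empty := by
        rw [hF]
    _ = (adj ((startsB (fw.map (fun r => pnOf r.2)) (fw.map (·.1))).map (gIdx fw))).foldl
          updB PySem.Dict.empty := by
        rw [adj_map]
    _ = (adj (runsB fw)).foldl updB PySem.Dict.empty := by
        rw [hstarts]

-- ===== VERDICT (by name: the statement is the Claim_ definition above) =====
theorem app_intervals_spec : Claim_equal_app_intervals := by
  intro fw _ _
  show app_intervals fw = app_intervals_alt fw
  rw [app_intervals_eq_specF, app_intervals_alt_eq_specF]
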